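-- pv_equiv track=rewrite | github.com/Ecoder-JianZhou/EcoPAD_v2 | sites/site-SPRUCE/app/loaders.py | _output_types_from_enabled_tasks
-- ===== SOURCE A (Python) =====
-- from typing import Any
--
-- SUPPORTED_OUTPUT_TYPES = (
--     "simulation_without_da",
--     "simulation_with_da",
--     "forecast_with_da",
--     "forecast_without_da",
--     "auto_forecast_with_da",
--     "auto_forecast_without_da",
-- )
--
-- LEGACY_TASK_ALIASES = {
--     "simulate": "simulation_without_da",
--     "simulation_without_da": "simulation_without_da",
--     "simulation without da": "simulation_without_da",
--
--     "simulation_with_da": "simulation_with_da",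
--     "simulation with da": "simulation_with_da",
--
--     "forecast_with_da": "forecast_with_da",
--     "forecast with da": "forecast_with_da",
--
--     "forecast_without_da": "forecast_without_da",
--     "forecast without da": "forecast_without_da",
--
--     "auto_forecast": "auto_forecast",
--     "auto forecast": "auto_forecast",
-- }
--
-- def _normalize_text(value: Any) -> str:
--     return str(value or "").strip()
--
-- def _normalize_task_type(value: Any) -> str:
--     text = _normalize_text(value).lower()
--     return LEGACY_TASK_ALIASES.get(text, text)
--
-- def _output_types_from_enabled_tasks(enabled_tasks: list[str]) -> list[str]:
--     """
--     Infer supported output types from enabled task names.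
--
--     Mapping:
--     - simulation_without_da -> simulation_without_da
--     - simulation_with_da -> simulation_with_da
--     - forecast_with_da -> forecast_with_da
--     - forecast_without_da -> forecast_without_da
--     - auto_forecast -> auto_forecast_with_da + auto_forecast_without_da
--     """
--     out: list[str] = []
--     seen: set[str] = set()
--
--     def add(value: str) -> None:
--         if value in SUPPORTED_OUTPUT_TYPES and value not in seen:
--             seen.add(value)
--             out.append(value)
--
--     for task_name in enabled_tasks:
--         task = _normalize_task_type(task_name)
--
--         if task == "simulation_without_da":
--             add("simulation_without_da")
--         elif task == "simulation_with_da":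
--             add("simulation_with_da")
--         elif task == "forecast_with_da":
--             add("forecast_with_da")
--         elif task == "forecast_without_da":
--             add("forecast_without_da")
--         elif task == "auto_forecast":
--             add("auto_forecast_with_da")
--             add("auto_forecast_without_da")
--
--     return out
-- ===== SOURCE B (Python) =====
-- from typing import Any
--
-- SUPPORTED_OUTPUT_TYPES = (
--     "simulation_without_da",
--     "simulation_with_da",
--     "forecast_with_da",
--     "forecast_without_da",
--     "auto_forecast_with_da",
--     "auto_forecast_without_da",
-- )
--
-- LEGACY_TASK_ALIASES = {
--     "simulate": "simulation_without_da",
--     "simulation_without_da": "simulation_without_da",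
--     "simulation without da": "simulation_without_da",
--     "simulation_with_da": "simulation_with_da",
--     "simulation with da": "simulation_with_da",
--     "forecast_with_da": "forecast_with_da",
--     "forecast with da": "forecast_with_da",
--     "forecast_without_da": "forecast_without_da",
--     "forecast without da": "forecast_without_da",
--     "auto_forecast": "auto_forecast",
--     "auto forecast": "auto_forecast",
-- }
--
-- def _normalize_text(value: Any) -> str:
--     return str(value or "").strip()
--
-- def _normalize_task_type(value: Any) -> str:
--     text = _normalize_text(value).lower()
--     return LEGACY_TASK_ALIASES.get(text, text)
--
-- # Catalogue: recognized task name -> the output types it enables.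
-- OUTPUTS_BY_TASK = {
--     "simulation_without_da": ("simulation_without_da",),
--     "simulation_with_da": ("simulation_with_da",),
--     "forecast_with_da": ("forecast_with_da",),
--     "forecast_without_da": ("forecast_without_da",),
--     "auto_forecast": ("auto_forecast_with_da", "auto_forecast_without_da"),
-- }
--
-- def _output_types_from_enabled_tasks(enabled_tasks: list[str]) -> list[str]:
--     # Catalogue-driven: for each recognized task, find where it first appears
--     # among the normalized inputs, order the present tasks by that position,
--     # then expand each one to its output types.  No dedup pass is needed:
--     # distinct tasks enable disjoint output types.
--     norm = [_normalize_task_type(t) for t in enabled_tasks]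
--     present = []
--     for task in OUTPUTS_BY_TASK:
--         if task in norm:
--             present.append((norm.index(task), task))
--     present.sort(key=lambda p: p[0])
--     out = []
--     for _, task in present:
--         out.extend(OUTPUTS_BY_TASK[task])
--     return out
-- ===== Notes on version B (the rewrite author's own statement) =====
-- stated objective: alternative
-- what changed: Instead of A's input-driven single pass with an if/elif chain and an inline seen-set, B is catalogue-driven: it looks up the first-occurrence index of each of the five recognized task names in the normalized input, sorts the present tasks by that index, and expands them to their output types with no dedup pass at all (distinct tasks enable disjoint outputs).
import Mathlib
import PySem

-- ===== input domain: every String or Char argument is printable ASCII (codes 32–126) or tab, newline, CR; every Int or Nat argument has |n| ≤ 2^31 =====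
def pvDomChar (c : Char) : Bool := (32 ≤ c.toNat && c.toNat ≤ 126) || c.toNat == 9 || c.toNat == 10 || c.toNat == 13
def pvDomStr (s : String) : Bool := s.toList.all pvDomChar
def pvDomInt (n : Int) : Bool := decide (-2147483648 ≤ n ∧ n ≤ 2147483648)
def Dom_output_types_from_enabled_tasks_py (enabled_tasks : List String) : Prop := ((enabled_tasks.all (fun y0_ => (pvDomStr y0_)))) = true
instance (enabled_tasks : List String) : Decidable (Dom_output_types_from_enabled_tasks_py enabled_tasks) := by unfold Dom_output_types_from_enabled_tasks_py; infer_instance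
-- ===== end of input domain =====

-- B replaces A's input-driven pass (if/elif chain + inline seen-set) with a catalogue-driven
-- algorithm: first-occurrence index of each recognized task, sort by index, expand; objective: alternative.

-- ===== PORT A =====
def pvSupported : List String :=
  ["simulation_without_da", "simulation_with_da", "forecast_with_da",
   "forecast_without_da", "auto_forecast_with_da", "auto_forecast_without_da"]

def pvAliases : PySem.Dict String String := PySem.Dict.ofList
  [("simulate", "simulation_without_da"),
   ("simulation_without_da", "simulation_without_da"),
   ("simulation without da", "simulation_without_da"),
   ("simulation_with_da", "simulation_with_da"),
   ("simulation with da", "simulation_with_da"),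
   ("forecast_with_da", "forecast_with_da"),
   ("forecast with da", "forecast_with_da"),
   ("forecast_without_da", "forecast_without_da"),
   ("forecast without da", "forecast_without_da"),
   ("auto_forecast", "auto_forecast"),
   ("auto forecast", "auto_forecast")]

-- `str(value or "")` on a string argument is the string itself ("" when empty); exact on strings
def pvNormalizeText (value : String) : String :=
  PySem.Str.strip (if value = "" then "" else value)

def pvNormalizeTaskType (value : String) : String :=
  let text := PySem.Str.lower (pvNormalizeText value)
  pvAliases.getD text text

def pvAdd (st : List String × PySem.Set String) (value : String) :
    List String × PySem.Set String :=
  if pvSupported.contains value && !(PySem.Set.contains st.2 value) then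
    (st.1 ++ [value], PySem.Set.add st.2 value)
  else st

def pvStepA (st : List String × PySem.Set String) (task_name : String) :
    List String × PySem.Set String :=
  let task := pvNormalizeTaskType task_name
  if task = "simulation_without_da" then pvAdd st "simulation_without_da"
  else if task = "simulation_with_da" then pvAdd st "simulation_with_da"
  else if task = "forecast_with_da" then pvAdd st "forecast_with_da"
  else if task = "forecast_without_da" then pvAdd st "forecast_without_da"
  else if task = "auto_forecast" then
    pvAdd (pvAdd st "auto_forecast_with_da") "auto_forecast_without_da"
  else st

def output_types_from_enabled_tasks_py (enabled_tasks : List String) : List String :=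
  (enabled_tasks.foldl pvStepA ([], PySem.Set.empty)).1

-- ===== PORT B =====
def pvOutputsByTask : PySem.Dict String (List String) := PySem.Dict.ofList
  [("simulation_without_da", ["simulation_without_da"]),
   ("simulation_with_da", ["simulation_with_da"]),
   ("forecast_with_da", ["forecast_with_da"]),
   ("forecast_without_da", ["forecast_without_da"]),
   ("auto_forecast", ["auto_forecast_with_da", "auto_forecast_without_da"])]

def output_types_from_enabled_tasks_py_alt (enabled_tasks : List String) : List String :=
  let norm := enabled_tasks.map pvNormalizeTaskType
  -- for task in OUTPUTS_BY_TASK: if task in norm: present.append((norm.index(task), task))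
  -- norm.index(task) cannot raise here (guarded by the membership test), so getD 0 is exact
  let present := pvOutputsByTask.keys.foldl
    (fun acc task =>
      if norm.contains task then
        acc ++ [((((PySem.List.index? norm task).getD 0 : Nat) : Int), task)]
      else acc) []
  -- present.sort(key=lambda p: p[0])
  let present := PySem.List.sorted present (fun p => p.1) false
  -- for _, task in present: out.extend(OUTPUTS_BY_TASK[task])  (key always present)
  present.foldl (fun acc p => acc ++ pvOutputsByTask.getD p.2 []) []

-- ===== PRECONDITION & SPEC =====
def Spec_output_types_from_enabled_tasks_py (enabled_tasks : List String) (out : List String) : Prop := out = output_types_from_enabled_tasks_py_alt enabled_tasks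
instance (enabled_tasks : List String) (out : List String) : Decidable (Spec_output_types_from_enabled_tasks_py enabled_tasks out) := by unfold Spec_output_types_from_enabled_tasks_py; infer_instance

-- ===== CLAIM (what is proved, stated in full; the proofs are below) =====
def Claim_equal_output_types_from_enabled_tasks_py : Prop := ∀ (enabled_tasks : List String), Dom_output_types_from_enabled_tasks_py enabled_tasks → Spec_output_types_from_enabled_tasks_py enabled_tasks (output_types_from_enabled_tasks_py enabled_tasks)

-- ===== LEMMAS AND PROOFS =====

-- abbreviations used only by the proofs
def pvG (u : String) : List String := pvOutputsByTask.getD u []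
def pvTasks : List String :=
  ["simulation_without_da", "simulation_with_da", "forecast_with_da",
   "forecast_without_da", "auto_forecast"]
-- the task that triggers a given output type
def pvTrig (o : String) : String :=
  if o = "auto_forecast_with_da" ∨ o = "auto_forecast_without_da" then "auto_forecast" else o

theorem pvOutputs_getD (u : String) :
    pvG u =
      if u = "simulation_without_da" then ["simulation_without_da"]
      else if u = "simulation_with_da" then ["simulation_with_da"]
      else if u = "forecast_with_da" then ["forecast_with_da"]
      else if u = "forecast_without_da" then ["forecast_without_da"]
      else if u = "auto_forecast" then ["auto_forecast_with_da", "auto_forecast_without_da"]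
      else [] := by
  unfold pvG
  by_cases h1 : u = "simulation_without_da"
  · subst h1; decide
  by_cases h2 : u = "simulation_with_da"
  · subst h2; decide
  by_cases h3 : u = "forecast_with_da"
  · subst h3; decide
  by_cases h4 : u = "forecast_without_da"
  · subst h4; decide
  by_cases h5 : u = "auto_forecast"
  · subst h5; decide
  simp only [if_neg h1, if_neg h2, if_neg h3, if_neg h4, if_neg h5]
  have hc : pvOutputsByTask.contains u = false := by
    rw [PySem.Dict.contains_eq_decide_mem_keys]
    have hk : pvOutputsByTask.keys = pvTasks := by decide
    rw [hk]; simp [pvTasks, h1, h2, h3, h4, h5]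
  exact PySem.Dict.getD_of_not_contains _ _ hc

theorem pvKeys : pvOutputsByTask.keys = pvTasks := by decide

theorem pvG_nil_of_not_task (u : String) (h : ¬ u ∈ pvTasks) : pvG u = [] := by
  rw [pvOutputs_getD]
  simp [pvTasks] at h
  obtain ⟨h1, h2, h3, h4, h5⟩ := h
  simp [h1, h2, h3, h4, h5]

theorem pvG_trig (u o : String) (h : o ∈ pvG u) : u = pvTrig o := by
  rw [pvOutputs_getD] at h
  split_ifs at h with h1 h2 h3 h4 h5 <;> simp at h <;> try subst h
  · subst h1; decide
  · subst h2; decide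
  · subst h3; decide
  · subst h4; decide
  · subst h5
    rcases h with h | h <;> subst h <;> decide

theorem pvG_disjoint (u v o : String) (huv : u ≠ v) (hu : o ∈ pvG u) : o ∉ pvG v := by
  intro hv
  exact huv ((pvG_trig u o hu).trans (pvG_trig v o hv).symm)

theorem pvAdd_diag (s : PySem.Set String) (v : String)
    (h : pvSupported.contains v = true) :
    pvAdd (s, s) v = (PySem.Set.add s v, PySem.Set.add s v) := by
  have h' : v ∈ pvSupported := by simpa using h
  by_cases hm : v ∈ s <;> simp [pvAdd, h', hm]

theorem pvStepA_diag (s : PySem.Set String) (t : String) :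
    pvStepA (s, s) t =
      (PySem.Set.update s (pvG (pvNormalizeTaskType t)),
       PySem.Set.update s (pvG (pvNormalizeTaskType t))) := by
  unfold pvStepA
  rw [pvOutputs_getD]
  set u := pvNormalizeTaskType t with hu
  clear_value u
  have c1 : pvSupported.contains "simulation_without_da" = true := by decide
  have c2 : pvSupported.contains "simulation_with_da" = true := by decide
  have c3 : pvSupported.contains "forecast_with_da" = true := by decide
  have c4 : pvSupported.contains "forecast_without_da" = true := by decide
  have c5 : pvSupported.contains "auto_forecast_with_da" = true := by decide
  have c6 : pvSupported.contains "auto_forecast_without_da" = true := by decide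
  split_ifs <;>
    simp_all [pvAdd_diag, PySem.Set.update_cons, PySem.Set.update_nil]

theorem pvLoopA (ts : List String) (s : PySem.Set String) :
    ts.foldl pvStepA (s, s) =
      (PySem.Set.update s (ts.flatMap (fun t => pvG (pvNormalizeTaskType t))),
       PySem.Set.update s (ts.flatMap (fun t => pvG (pvNormalizeTaskType t)))) := by
  induction ts generalizing s with
  | nil => simp [PySem.Set.update_nil]
  | cons t ts ih =>
    simp only [List.foldl_cons, List.flatMap_cons, pvStepA_diag, ih,
      PySem.Set.update_append]

-- A's result is the ordered dedup of the flat expansion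
theorem pvA_eq_ofList (ts : List String) :
    output_types_from_enabled_tasks_py ts
      = PySem.Set.ofList ((ts.map pvNormalizeTaskType).flatMap pvG) := by
  unfold output_types_from_enabled_tasks_py
  rw [show (([] : List String), (PySem.Set.empty : PySem.Set String))
        = ((PySem.Set.empty : PySem.Set String), PySem.Set.empty) from rfl]
  rw [pvLoopA]
  rw [List.flatMap_map]
  simp [PySem.Set.update_nil_left]

-- Set.ofList peels one element
theorem pvOfList_cons (x : String) (l : List String) :
    PySem.Set.ofList (x :: l)
      = x :: (PySem.Set.ofList l).filter (fun y => !(PySem.Set.contains [x] y)) := by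
  rw [show PySem.Set.ofList (x :: l) = PySem.Set.update (PySem.Set.add PySem.Set.empty x) l from rfl]
  rw [show PySem.Set.add PySem.Set.empty x = [x] from rfl]
  rw [PySem.Set.update_eq_append_filter]
  rfl

-- flatMap of a filtered list = flatMap with the function nilled outside the filter
theorem pvFlatMap_filter (p : String → Bool) (g : String → List String) :
    ∀ (S : List String),
      (S.filter p).flatMap g = S.flatMap (fun u => if p u then g u else []) := by
  intro S
  induction S with
  | nil => rfl
  | cons x S ih =>
    by_cases h : p x <;> simp [h, ih]

-- dedup commutes with the (disjoint-image, nodup) expansion pvG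
theorem pvOfList_flatMap : ∀ (l : List String),
    PySem.Set.ofList (l.flatMap pvG) = (PySem.Set.ofList l).flatMap pvG := by
  intro l
  induction l with
  | nil => rfl
  | cons x l ih =>
    rw [List.flatMap_cons, PySem.Set.ofList_append, PySem.Set.update_eq_append_filter, ih,
        pvOfList_cons, List.flatMap_cons]
    have hofl : PySem.Set.ofList (pvG x) = pvG x := by
      rw [pvOutputs_getD]; split_ifs <;> decide
    rw [hofl]
    congr 1
    rw [List.filter_flatMap, pvFlatMap_filter]
    have hpt : ∀ u : String,
        (pvG u).filter (fun y => !(PySem.Set.contains (pvG x) y))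
          = if (!(PySem.Set.contains [x] u)) = true then pvG u else [] := by
      intro u
      by_cases hux : u = x
      · subst hux
        rw [show (!(PySem.Set.contains [u] u)) = false by simp [PySem.Set.contains]]
        simp only [Bool.false_eq_true, if_false]
        rw [List.filter_eq_nil_iff]
        intro y hy
        simp [PySem.Set.contains, hy]
      · have h1 : (!(PySem.Set.contains [x] u)) = true := by
          simp [PySem.Set.contains]; exact fun h => hux (by simp_all)
        rw [h1, if_pos rfl]
        apply List.filter_eq_self.mpr
        intro y hy
        have : y ∉ pvG x := pvG_disjoint u x y hux hy
        simp [PySem.Set.contains, this]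
    rw [funext hpt]

-- first-occurrence indices strictly increase along Set.ofList
theorem pvIdxOf_cons_ne (x a : String) (t : List String) (h : a ≠ x) :
    (x :: t).idxOf a = t.idxOf a + 1 := by
  simp [Ne.symm h]

theorem pvOfList_pairwise_idx : ∀ (l : List String),
    (PySem.Set.ofList l).Pairwise (fun a b => l.idxOf a < l.idxOf b) := by
  intro l
  induction l with
  | nil => exact List.Pairwise.nil
  | cons x l ih =>
    rw [pvOfList_cons]
    have hne : ∀ b ∈ (PySem.Set.ofList l).filter (fun y => !(PySem.Set.contains [x] y)),
        b ≠ x := by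
      intro b hb
      have h2 := (List.mem_filter.mp hb).2
      simp [PySem.Set.contains] at h2
      exact fun h => h2 (by simp_all)
    constructor
    · intro b hb
      rw [List.idxOf_cons_self, pvIdxOf_cons_ne x b l (hne b hb)]
      omega
    · have hp := List.Pairwise.filter (l := PySem.Set.ofList l)
        (fun y => !(PySem.Set.contains [x] y)) ih
      refine hp.imp_of_mem ?_
      intro a b ha hb hab
      rw [pvIdxOf_cons_ne x a l (hne a ha), pvIdxOf_cons_ne x b l (hne b hb)]
      omega

theorem idxOf?_of_mem : ∀ (l : List String) (u : String), u ∈ l → l.idxOf? u = some (l.idxOf u) := by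
  intro l
  induction l with
  | nil => intro u h; simp at h
  | cons x t ih =>
    intro u h
    by_cases hx : x = u
    · subst hx; simp [List.idxOf?_cons]
    · have hu : u ∈ t := by
        cases h with
        | head => exact absurd rfl hx
        | tail _ h => exact h
      simp [List.idxOf?_cons, hx, ih u hu]

theorem pvIndex?_getD (norm : List String) (u : String) (h : norm.contains u = true) :
    ((((PySem.List.index? norm u).getD 0 : Nat)) : Int) = (norm.idxOf u : Int) := by
  have hm : u ∈ norm := by simpa using h
  rw [PySem.List.index?_eq_idxOf?, idxOf?_of_mem norm u hm]
  rfl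

theorem pvMain (ts : List String) :
    output_types_from_enabled_tasks_py ts = output_types_from_enabled_tasks_py_alt ts := by
  unfold output_types_from_enabled_tasks_py_alt
  dsimp only
  set norm := ts.map pvNormalizeTaskType with hnorm
  rw [pvKeys]
  rw [PySem.List.foldl_append_if (p := fun task => norm.contains task)
    (f := fun task => ((((PySem.List.index? norm task).getD 0 : Nat) : Int), task))]
  simp only [List.nil_append]
  have hmapf : (pvTasks.filter (fun task => norm.contains task)).map
      (fun task => ((((PySem.List.index? norm task).getD 0 : Nat) : Int), task))
      = (pvTasks.filter (fun task => norm.contains task)).map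
      (fun u => ((norm.idxOf u : Int), u)) := by
    apply List.map_congr_left
    intro u hu
    have hc := (List.mem_filter.mp hu).2
    rw [pvIndex?_getD norm u hc]
  rw [hmapf]
  have hperm : ((((PySem.Set.ofList norm).filter (fun u => pvTasks.contains u))).map
        (fun u => ((norm.idxOf u : Int), u))).Perm
      ((pvTasks.filter (fun task => norm.contains task)).map
        (fun u => ((norm.idxOf u : Int), u))) := by
    apply List.Perm.map
    apply (List.perm_ext_iff_of_nodup
      (List.Nodup.filter _ (PySem.Set.nodup_ofList norm))
      (List.Nodup.filter _ (by decide : pvTasks.Nodup))).2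
    intro a
    simp only [List.mem_filter, PySem.Set.mem_ofList]
    constructor
    · rintro ⟨h1, h2⟩
      exact ⟨by simpa using h2, by simpa using h1⟩
    · rintro ⟨h1, h2⟩
      exact ⟨by simpa using h2, by simpa using h1⟩
  have hpair : ((((PySem.Set.ofList norm).filter (fun u => pvTasks.contains u))).map
        (fun u => ((norm.idxOf u : Int), u))).Pairwise
      (fun a b => (fun p : Int × String => p.1) a < (fun p : Int × String => p.1) b) := by
    have h0 := List.Pairwise.filter (l := PySem.Set.ofList norm)
      (fun u => pvTasks.contains u) (pvOfList_pairwise_idx norm)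
    rw [List.pairwise_map]
    exact h0.imp (fun h => by dsimp only; exact_mod_cast h)
  rw [PySem.List.sorted_eq_of_perm_of_pairwise_lt _ _ _ hperm hpair]
  rw [PySem.List.foldl_append_eq_flatMap]
  simp only [List.nil_append]
  rw [List.flatMap_map]
  rw [pvA_eq_ofList, ← hnorm, pvOfList_flatMap]
  rw [pvFlatMap_filter]
  have hpt2 : (fun u => if pvTasks.contains u = true
        then pvOutputsByTask.getD ((((List.idxOf u norm : Nat) : Int), u)).2 [] else [])
      = pvG := by
    funext u
    by_cases h : u ∈ pvTasks
    · simp [h, pvG]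
    · rw [if_neg (by simpa using h), pvG_nil_of_not_task u h]
  rw [hpt2]

-- ===== VERDICT (by name: the statement is the Claim_ definition above) =====
theorem output_types_from_enabled_tasks_py_spec : Claim_equal_output_types_from_enabled_tasks_py := by
  intro ts _
  unfold Spec_output_types_from_enabled_tasks_py
  exact pvMain ts
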